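-- pv_equiv track=rewrite | github.com/KillerZeus666/NumberLink | numberlink_best_first.py | encontrar_pares
-- ===== SOURCE A (Python) =====
-- def encontrar_pares(tablero):
--     """Encuentra todos los pares de números en el tablero."""
--     pares = {}
--     filas = len(tablero)
--     cols = len(tablero[0]) if filas > 0 else 0
--
--     for i in range(filas):
--         for j in range(cols):
--             celda = tablero[i][j]
--             if celda != ' ':
--                 if celda not in pares:
--                     pares[celda] = []
--                 pares[celda].append((i, j))
--
--     pares_validos = {k: v for k, v in pares.items() if len(v) == 2}
--     return pares_validos
-- ===== SOURCE B (Python) =====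
-- def encontrar_pares(tablero):
--     """Encuentra todos los pares de numeros en el tablero."""
--     cols = len(tablero[0]) if tablero else 0
--     # one flat pass collecting (valor, posicion) in row-major order
--     celdas = [(fila[j], (i, j)) for i, fila in enumerate(tablero) for j in range(cols)]
--     # multiplicity of each value, computed once
--     cnt = {}
--     for v, _ in celdas:
--         cnt[v] = cnt.get(v, 0) + 1
--     # keep only positions of values occurring exactly twice
--     pares = {}
--     for v, pos in celdas:
--         if v != ' ' and cnt[v] == 2:
--             pares.setdefault(v, []).append(pos)
--     return pares
-- ===== Notes on version B (the rewrite author's own statement) =====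
-- stated objective: alternative
-- what changed: Instead of accumulating a position list for every value and filtering the dict afterwards, B flattens the board into one (value, position) list, precomputes each value's multiplicity in a counting pass, and then builds only the position lists of values occurring exactly twice.
import Mathlib
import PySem

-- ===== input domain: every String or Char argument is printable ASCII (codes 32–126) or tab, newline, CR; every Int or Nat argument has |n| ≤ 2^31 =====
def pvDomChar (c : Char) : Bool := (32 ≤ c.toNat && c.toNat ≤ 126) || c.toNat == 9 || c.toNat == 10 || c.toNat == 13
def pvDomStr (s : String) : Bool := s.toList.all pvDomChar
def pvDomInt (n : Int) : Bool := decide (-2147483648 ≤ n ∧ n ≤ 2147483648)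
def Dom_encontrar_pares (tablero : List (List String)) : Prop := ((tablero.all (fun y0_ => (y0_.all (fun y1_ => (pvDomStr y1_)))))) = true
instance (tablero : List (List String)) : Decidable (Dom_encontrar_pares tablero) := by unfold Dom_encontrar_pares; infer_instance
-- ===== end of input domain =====

-- B groups by precomputing each value's multiplicity in one flat pass and only materialising
-- the position lists of values occurring exactly twice (objective: alternative decomposition).

-- ===== PORT A =====
-- for i / for j loops with tablero[i][j]: pyGetD is exact under Pre_ (in-range indices);
-- `if celda not in pares: pares[celda] = []` + append is exactly Dict.modify celda [] (· ++ [(i,j)]).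
def encontrar_pares (tablero : List (List String)) : List (String × List (Int × Int)) :=
  let filas : Int := tablero.length
  let cols : Int := if filas > 0 then ((PySem.List.pyGetD tablero 0 []).length : Int) else 0
  let pares : PySem.Dict String (List (Int × Int)) :=
    (PySem.List.pyRange 0 filas 1).foldl (fun d i =>
      (PySem.List.pyRange 0 cols 1).foldl (fun d j =>
        let celda := PySem.List.pyGetD (PySem.List.pyGetD tablero i []) j " "
        if celda ≠ " " then d.modify celda [] (· ++ [(i, j)]) else d) d)
      PySem.Dict.empty
  -- dict comprehension over pares.items() (keys distinct): keeps the surviving items in order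
  pares.items.filter (fun kv => kv.2.length == 2)

-- ===== PORT B =====
-- celdas: the flat [(valor, (i, j)) …] comprehension; cnt: the counting loop with dict.get;
-- pares.setdefault(v, []).append(pos) is exactly Dict.modify v [] (· ++ [pos]).
def encontrar_pares_alt (tablero : List (List String)) : List (String × List (Int × Int)) :=
  let cols : Int := if tablero ≠ [] then ((PySem.List.pyGetD tablero 0 []).length : Int) else 0
  let celdas : List (String × (Int × Int)) :=
    (PySem.List.enumerate tablero).flatMap (fun p =>
      (PySem.List.pyRange 0 cols 1).map (fun j => (PySem.List.pyGetD p.2 j " ", (p.1, j))))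
  let cnt : PySem.Dict String Int :=
    celdas.foldl (fun d p => d.insert p.1 (d.getD p.1 0 + 1)) PySem.Dict.empty
  let pares : PySem.Dict String (List (Int × Int)) :=
    celdas.foldl (fun d p =>
      if p.1 ≠ " " ∧ cnt.getD p.1 0 == 2 then d.modify p.1 [] (· ++ [p.2]) else d)
      PySem.Dict.empty
  pares.items

-- ===== PRECONDITION & SPEC =====
-- Python A raises IndexError on ragged boards whose later rows are shorter than row 0; excluded.
def Pre_encontrar_pares (tablero : List (List String)) : Prop :=
  ∀ fila ∈ tablero, (tablero.headD []).length ≤ fila.length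
instance (tablero : List (List String)) : Decidable (Pre_encontrar_pares tablero) := by
  unfold Pre_encontrar_pares; infer_instance

def pvWitness_encontrar_pares : List (List String) :=
  [["1", " ", "2"], ["2", "1", "1"]]

def Spec_encontrar_pares (tablero : List (List String)) (out : List (String × List (Int × Int))) : Prop := out = encontrar_pares_alt tablero
instance (tablero : List (List String)) (out : List (String × List (Int × Int))) : Decidable (Spec_encontrar_pares tablero out) := by unfold Spec_encontrar_pares; infer_instance

-- ===== CLAIM (what is proved, stated in full; the proofs are below) =====
def Claim_equal_encontrar_pares : Prop := ∀ (tablero : List (List String)), Dom_encontrar_pares tablero → Pre_encontrar_pares tablero → Spec_encontrar_pares tablero (encontrar_pares tablero)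

-- ===== LEMMAS AND PROOFS =====

-- the flat cell list both ports traverse (B's `celdas` comprehension)
def pvCells (tablero : List (List String)) (cols : Int) : List (String × (Int × Int)) :=
  (PySem.List.enumerate tablero).flatMap (fun p =>
    (PySem.List.pyRange 0 cols 1).map (fun j => (PySem.List.pyGetD p.2 j " ", (p.1, j))))

-- A's per-cell step
def pvStepA (d : PySem.Dict String (List (Int × Int))) (q : String × (Int × Int)) :
    PySem.Dict String (List (Int × Int)) :=
  if q.1 ≠ " " then d.modify q.1 [] (· ++ [q.2]) else d

-- positions of key k in l, in order
def pvGrp (l : List (String × (Int × Int))) (k : String) : List (Int × Int) :=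
  (l.filter (fun q => q.1 == k)).map Prod.snd

lemma pv_foldl_flatMap {α β δ : Type} (l : List α) (f : α → List β) (g : δ → β → δ) (i : δ) :
    (l.flatMap f).foldl g i = l.foldl (fun acc x => (f x).foldl g acc) i := by
  induction l generalizing i with
  | nil => rfl
  | cons x xs ih => simp [List.flatMap_cons, List.foldl_append, ih]

lemma pv_foldl_ext {α δ : Type} (l : List α) (f g : δ → α → δ) (i : δ)
    (h : ∀ acc x, f acc x = g acc x) : l.foldl f i = l.foldl g i := by
  congr 1
  funext acc x
  exact h acc x

-- a 'for i in range(len(full)): … full[i] …' loop is a fold over enumerate(full)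
lemma pv_enum_fold {α β : Type} (full : List α) (dflt : α) (g : β → Int → α → β) :
    ∀ (post : List α) (s : ℕ) (acc : β), full.drop s = post →
    (PySem.List.pyRange (s : Int) (full.length : Int) 1).foldl
        (fun acc i => g acc i (PySem.List.pyGetD full i dflt)) acc
      = (PySem.List.enumerate post (s : Int)).foldl (fun acc p => g acc p.1 p.2) acc := by
  intro post
  induction post with
  | nil =>
    intro s acc h
    have hs : full.length ≤ s := List.drop_eq_nil_iff.mp h
    rw [PySem.List.pyRange_one_eq_nil (by exact_mod_cast hs)]
    simp [PySem.List.enumerate]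
  | cons x rest ih =>
    intro s acc h
    have hs : s < full.length := by
      by_contra hle
      rw [List.drop_eq_nil_iff.mpr (by omega)] at h
      simp at h
    have hget : full[s]? = some x := by
      have h0 : (full.drop s)[0]? = some x := by rw [h]; rfl
      rwa [List.getElem?_drop, Nat.add_zero] at h0
    have hgd : PySem.List.pyGetD full (s : Int) dflt = x := by
      rw [PySem.List.pyGetD_natCast]
      simp [List.getD_eq_getElem?_getD, hget]
    have htail : full.drop (s + 1) = rest := by
      have ht : (full.drop s).tail = rest := by rw [h]; rfl
      rwa [List.tail_drop] at ht
    rw [PySem.List.pyRange_one_cons (by exact_mod_cast hs), PySem.List.enumerate_cons]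
    simp only [List.foldl_cons, hgd]
    have hstep := ih (s + 1) (g acc (s : Int) x) htail
    push_cast at hstep
    exact hstep

-- an ite-guarded fold is a fold over the filtered list
lemma pv_foldl_ite {α δ : Type} (l : List α) (p : α → Prop) [DecidablePred p]
    (f : δ → α → δ) (i : δ) :
    l.foldl (fun d q => if p q then f d q else d) i
      = (l.filter (fun q => decide (p q))).foldl f i := by
  rw [List.foldl_filter]
  congr 1
  funext d q
  by_cases h : p q <;> simp [h]

lemma pv_discard_filter {α : Type} [BEq α] (s : List α) (x : α) (p : α → Bool) :
    PySem.Set.discard (s.filter p) x = (PySem.Set.discard s x).filter p := by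
  show (s.filter p).filter (fun y => !(y == x)) = (s.filter (fun y => !(y == x))).filter p
  rw [List.filter_filter, List.filter_filter]
  exact List.filter_congr (fun y _ => Bool.and_comm ..)

lemma pv_ofList_filter {α : Type} [BEq α] [LawfulBEq α] (xs : List α) (p : α → Bool) :
    PySem.Set.ofList (xs.filter p) = (PySem.Set.ofList xs).filter p := by
  induction xs with
  | nil => rfl
  | cons x xs ih =>
    by_cases hp : p x = true
    · rw [List.filter_cons_of_pos hp, PySem.Set.ofList_cons, PySem.Set.ofList_cons,
        List.filter_cons_of_pos hp, ih, pv_discard_filter]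
    · rw [List.filter_cons_of_neg (by simp [hp]), PySem.Set.ofList_cons,
        List.filter_cons_of_neg (by simp [hp]), ih, ← pv_discard_filter]
      show _ = PySem.Set.discard _ x
      rw [show PySem.Set.discard ((PySem.Set.ofList xs).filter p) x
            = ((PySem.Set.ofList xs).filter p).filter (fun y => !(y == x)) from rfl,
        List.filter_filter]
      refine (List.filter_congr (fun y _ => ?_)).symm
      by_cases hyx : y = x
      · subst hyx; simp [hp]
      · simp [hyx]

lemma pv_D_items (l : List (String × (Int × Int))) :
    (l.foldl (fun d q => d.modify q.1 [] (· ++ [q.2]))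
        (PySem.Dict.empty : PySem.Dict String (List (Int × Int)))).items
      = (PySem.Set.ofList (l.map Prod.fst)).map (fun k => (k, pvGrp l k)) := by
  have hnd : (l.foldl (fun d q => d.modify q.1 [] (· ++ [q.2]))
      (PySem.Dict.empty : PySem.Dict String (List (Int × Int)))).keys.Nodup :=
    PySem.Dict.nodup_keys_foldl_modify_key _ _ _ _ _ PySem.Dict.nodup_keys_empty
  rw [PySem.Dict.items_eq_map_keys _ hnd []]
  have hkeys : (l.foldl (fun d q => d.modify q.1 [] (· ++ [q.2]))
      (PySem.Dict.empty : PySem.Dict String (List (Int × Int)))).keys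
        = PySem.Set.ofList (l.map Prod.fst) := by
    rw [PySem.Dict.keys_foldl_modify_key]
    simp [PySem.Dict.keys_empty, PySem.Set.update_nil_left]
  rw [hkeys]
  refine List.map_congr_left (fun k _ => ?_)
  rw [PySem.Dict.getD_foldl_modify_append]
  simp [PySem.Dict.getD_empty, pvGrp]

lemma pv_cnt_getD (cells : List (String × (Int × Int))) (v : String) :
    (cells.foldl (fun d q => d.insert q.1 (d.getD q.1 0 + 1))
        (PySem.Dict.empty : PySem.Dict String Int)).getD v 0
      = ((cells.map Prod.fst).count v : Int) := by
  rw [← List.foldl_map (f := Prod.fst)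
        (g := fun (d : PySem.Dict String Int) x => d.insert x (d.getD x 0 + 1)),
    PySem.Dict.getD_foldl_insert_add_one]
  simp [PySem.Dict.getD_empty]

lemma pv_count_ne (cells : List (String × (Int × Int))) (k : String) (hk : k ≠ " ") :
    ((cells.filter (fun q => decide (q.1 ≠ " "))).map Prod.fst).count k
      = (cells.map Prod.fst).count k := by
  induction cells with
  | nil => rfl
  | cons q rest ih =>
    simp only [ne_eq, decide_not] at ih
    by_cases h : q.1 = " "
    · have h2 : ¬(" " = k) := fun e => hk e.symm
      simp [h, h2, ih]
    · simp [h, List.count_cons, ih]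

-- grouped-then-filtered equals count-first-then-grouped, on any flat cell list
lemma pv_core (cells : List (String × (Int × Int))) (cnt : PySem.Dict String Int)
    (hcnt : ∀ v, cnt.getD v 0 = ((cells.map Prod.fst).count v : Int)) :
    ((cells.foldl pvStepA PySem.Dict.empty).items).filter (fun kv => kv.2.length == 2)
      = (cells.foldl (fun d q =>
          if q.1 ≠ " " ∧ (cnt.getD q.1 0 == 2) then d.modify q.1 [] (· ++ [q.2]) else d)
          PySem.Dict.empty).items := by
  have hA : cells.foldl pvStepA PySem.Dict.empty
      = (cells.filter (fun q => decide (q.1 ≠ " "))).foldl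
          (fun d q => d.modify q.1 [] (· ++ [q.2])) PySem.Dict.empty :=
    pv_foldl_ite cells (fun q => q.1 ≠ " ") _ _
  have hB : cells.foldl (fun d q =>
        if q.1 ≠ " " ∧ (cnt.getD q.1 0 == 2) then d.modify q.1 [] (· ++ [q.2]) else d)
        PySem.Dict.empty
      = (cells.filter (fun q => decide (q.1 ≠ " " ∧ (cnt.getD q.1 0 == 2)))).foldl
          (fun d q => d.modify q.1 [] (· ++ [q.2])) PySem.Dict.empty :=
    pv_foldl_ite cells (fun q => q.1 ≠ " " ∧ (cnt.getD q.1 0 == 2)) _ _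
  rw [hA, hB]
  have hl'' : cells.filter (fun q => decide (q.1 ≠ " " ∧ (cnt.getD q.1 0 == 2)))
      = (cells.filter (fun q => decide (q.1 ≠ " "))).filter
          (fun q => cnt.getD q.1 0 == 2) := by
    rw [List.filter_filter]
    refine List.filter_congr (fun x _ => ?_)
    by_cases h1 : x.1 = " " <;> by_cases h2 : (cnt.getD x.1 0 == 2) = true <;> simp [h1, h2]
  rw [hl'', pv_D_items, pv_D_items]
  have hmem : ∀ k ∈ (cells.filter (fun q => decide (q.1 ≠ " "))).map Prod.fst, k ≠ " " := by
    intro k hkmem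
    obtain ⟨q, hq, hqk⟩ := List.mem_map.mp hkmem
    have hq2 := (List.mem_filter.mp hq).2
    simp at hq2
    exact hqk ▸ hq2
  have hcount : ∀ k, k ≠ " " →
      (pvGrp (cells.filter (fun q => decide (q.1 ≠ " "))) k).length
        = (cells.map Prod.fst).count k := by
    intro k hkne
    have h1 : (pvGrp (cells.filter (fun q => decide (q.1 ≠ " "))) k).length
        = (cells.filter (fun q => decide (q.1 ≠ " "))).countP (fun q => q.1 == k) := by
      rw [pvGrp, List.length_map, ← List.countP_eq_length_filter]
    have h2 : (cells.filter (fun q => decide (q.1 ≠ " "))).countP (fun q => q.1 == k)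
        = ((cells.filter (fun q => decide (q.1 ≠ " "))).map Prod.fst).count k := by
      rw [List.count_eq_countP, List.countP_map]; rfl
    rw [h1, h2, pv_count_ne cells k hkne]
  have hks : ((cells.filter (fun q => decide (q.1 ≠ " "))).filter
          (fun q => cnt.getD q.1 0 == 2)).map Prod.fst
      = ((cells.filter (fun q => decide (q.1 ≠ " "))).map Prod.fst).filter
          (fun k => cnt.getD k 0 == 2) := by
    rw [List.filter_map]; rfl
  rw [hks, pv_ofList_filter, List.filter_map]
  have hfilter : (PySem.Set.ofList ((cells.filter (fun q => decide (q.1 ≠ " "))).map Prod.fst)).filter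
        ((fun kv : String × List (Int × Int) => kv.2.length == 2)
          ∘ (fun k => (k, pvGrp (cells.filter (fun q => decide (q.1 ≠ " "))) k)))
      = (PySem.Set.ofList ((cells.filter (fun q => decide (q.1 ≠ " "))).map Prod.fst)).filter
          (fun k => cnt.getD k 0 == 2) := by
    refine List.filter_congr (fun k hkm => ?_)
    have hkne : k ≠ " " := hmem k (by
      have := hkm
      rw [PySem.Set.mem_ofList] at this
      exact this)
    simp only [Function.comp]
    rw [hcount k hkne, hcnt k]
    rw [Bool.eq_iff_iff]
    simp only [beq_iff_eq]
    omega
  rw [hfilter]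
  refine List.map_congr_left (fun k hkm => ?_)
  have hc2 : (cnt.getD k 0 == 2) = true := (List.mem_filter.mp hkm).2
  have hgrp : pvGrp ((cells.filter (fun q => decide (q.1 ≠ " "))).filter
        (fun q => cnt.getD q.1 0 == 2)) k
      = pvGrp (cells.filter (fun q => decide (q.1 ≠ " "))) k := by
    rw [pvGrp, pvGrp, List.filter_filter]
    refine congrArg (List.map Prod.snd) (List.filter_congr (fun q _ => ?_))
    by_cases hq : q.1 = k
    · simp [hq, hc2]
    · simp [hq]
  rw [hgrp]

-- A's nested index loops build exactly the fold of pvStepA over pvCells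
lemma pvA_fold (tablero : List (List String)) (cols : Int) :
    (PySem.List.pyRange 0 (tablero.length : Int) 1).foldl (fun d i =>
        (PySem.List.pyRange 0 cols 1).foldl (fun d j =>
          if PySem.List.pyGetD (PySem.List.pyGetD tablero i []) j " " ≠ " "
          then d.modify (PySem.List.pyGetD (PySem.List.pyGetD tablero i []) j " ") []
                 (· ++ [(i, j)])
          else d) d)
        (PySem.Dict.empty : PySem.Dict String (List (Int × Int)))
      = (pvCells tablero cols).foldl pvStepA PySem.Dict.empty := by
  have henum := pv_enum_fold tablero []
      (fun (d : PySem.Dict String (List (Int × Int))) i fila =>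
        (PySem.List.pyRange 0 cols 1).foldl (fun d j =>
          pvStepA d (PySem.List.pyGetD fila j " ", (i, j))) d)
      tablero 0 PySem.Dict.empty (by simp)
  simp only [Nat.cast_zero] at henum
  rw [pvCells, pv_foldl_flatMap]
  refine Eq.trans ?_ (Eq.trans henum ?_)
  · rfl
  · exact pv_foldl_ext _ _ _ _ (fun acc p => by rw [List.foldl_map])

theorem pv_main (tablero : List (List String)) :
    encontrar_pares tablero = encontrar_pares_alt tablero := by
  unfold encontrar_pares encontrar_pares_alt
  have hcols : (if (tablero.length : Int) > 0
        then ((PySem.List.pyGetD tablero 0 []).length : Int) else 0)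
      = (if tablero ≠ [] then ((PySem.List.pyGetD tablero 0 []).length : Int) else 0) := by
    cases tablero <;> simp
  dsimp only
  rw [hcols, pvA_fold]
  refine pv_core _ _ (fun v => pv_cnt_getD _ v)

-- ===== VERDICT (by name: the statement is the Claim_ definition above) =====
theorem encontrar_pares_spec : Claim_equal_encontrar_pares := by
  intro tablero _ _
  unfold Spec_encontrar_pares
  exact pv_main tablero
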